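-- pv_equiv track=rewrite | github.com/TheGeppetto/Level-0-challenges | Task0,9.py | get_vowel
-- ===== SOURCE A (Python) =====
-- def get_vowel(input_string):
--     #I convert all the characters into lowercase and find the vowels and avoid repititions
--     input_string = input_string.lower()
--     vowel_list = []
--     for i in input_string:
--         if i in ["a","e","i","o","u"]:
--             if i not in vowel_list:
--                 vowel_list.append(i)
--     return "Vowels: " + ", ".join(str(i) for i in vowel_list)
-- ===== SOURCE B (Python) =====
-- def get_vowel(input_string):
--     s = input_string.lower()
--     pairs = [(s.find(v), v) for v in "aeiou" if v in s]
--     pairs.sort(key=lambda p: p[0])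
--     return "Vowels: " + ", ".join(v for _, v in pairs)
-- ===== Notes on version B (the rewrite author's own statement) =====
-- stated objective: faster
-- what changed: Instead of scanning the string char-by-char while maintaining a seen-list, B computes s.find(v) once for each of the 5 vowels present in the lowered string and sorts the (first-index, vowel) pairs, yielding the vowels in first-appearance order.
import Mathlib
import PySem

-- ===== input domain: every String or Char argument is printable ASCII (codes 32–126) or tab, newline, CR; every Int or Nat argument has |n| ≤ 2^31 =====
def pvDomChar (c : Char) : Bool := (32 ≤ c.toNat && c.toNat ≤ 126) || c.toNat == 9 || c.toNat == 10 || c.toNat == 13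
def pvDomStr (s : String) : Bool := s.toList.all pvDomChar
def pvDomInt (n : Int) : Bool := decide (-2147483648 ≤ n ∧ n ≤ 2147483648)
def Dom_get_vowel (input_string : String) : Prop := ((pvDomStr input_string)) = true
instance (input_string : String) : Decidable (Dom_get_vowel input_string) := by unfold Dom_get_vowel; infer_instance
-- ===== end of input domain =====

-- B replaces A's char-by-char scan with a seen-list by a fixed 5-vowel first-index table
-- sorted by first occurrence (constant-factor faster in CPython: C-level find; same exact output).

-- ===== PORT A =====
def get_vowel (input_string : String) : String :=
  let s := PySem.Chars.lower input_string.toList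
  let vowel_list := s.foldl (fun acc i =>
      if (['a','e','i','o','u'] : List Char).contains i then
        if !acc.contains i then acc ++ [i] else acc
      else acc) []
  String.mk ("Vowels: ".toList ++ PySem.Chars.join [',', ' '] (vowel_list.map (fun i => [i])))

-- ===== PORT B =====
def get_vowel_alt (input_string : String) : String :=
  let s := PySem.Chars.lower input_string.toList
  let pairs := ((['a','e','i','o','u'] : List Char).filter
      (fun v => PySem.Chars.isIn [v] s)).map (fun v => (PySem.Chars.find s [v], v))
  let ps := PySem.List.sorted pairs (fun p => p.1) false
  String.mk ("Vowels: ".toList ++ PySem.Chars.join [',', ' '] (ps.map (fun p => [p.2])))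

-- ===== PRECONDITION & SPEC =====
def Spec_get_vowel (input_string : String) (out : String) : Prop := out = get_vowel_alt input_string
instance (input_string : String) (out : String) : Decidable (Spec_get_vowel input_string out) := by unfold Spec_get_vowel; infer_instance

-- ===== CLAIM (what is proved, stated in full; the proofs are below) =====
def Claim_equal_get_vowel : Prop := ∀ (input_string : String), Dom_get_vowel input_string → Spec_get_vowel input_string (get_vowel input_string)

-- ===== LEMMAS AND PROOFS =====

-- A's loop, as a standalone function of the (already lowered) character list.
def foldA (l : List Char) : List Char :=
  l.foldl (fun acc i =>
      if (['a','e','i','o','u'] : List Char).contains i then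
        if !acc.contains i then acc ++ [i] else acc
      else acc) []

lemma foldA_append (l : List Char) (c : Char) :
    foldA (l ++ [c]) =
      (if (['a','e','i','o','u'] : List Char).contains c then
        if !(foldA l).contains c then foldA l ++ [c] else foldA l
      else foldA l) := by
  simp only [foldA, List.foldl_append, List.foldl_cons, List.foldl_nil]

lemma mem_foldA (l : List Char) (u : Char) :
    u ∈ foldA l ↔ u ∈ (['a','e','i','o','u'] : List Char) ∧ u ∈ l := by
  induction l using List.reverseRecOn with
  | nil => simp [foldA]
  | append_singleton l c ih =>
    rw [foldA_append]
    split_ifs with hv hc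
    · -- c is a vowel, not yet collected: appended
      simp only [List.contains_eq_mem, decide_eq_true_eq] at hv
      simp only [List.mem_append, List.mem_singleton, ih]
      constructor
      · rintro (⟨h1, h2⟩ | rfl)
        · exact ⟨h1, Or.inl h2⟩
        · exact ⟨hv, Or.inr rfl⟩
      · rintro ⟨h1, h2 | rfl⟩
        · exact Or.inl ⟨h1, h2⟩
        · exact Or.inr rfl
    · -- c is a vowel already collected
      simp only [Bool.not_eq_true', Bool.not_eq_false] at hc
      simp only [List.contains_eq_mem, decide_eq_true_eq] at hc
      rw [ih]
      simp only [List.mem_append, List.mem_singleton]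
      constructor
      · rintro ⟨h1, h2⟩; exact ⟨h1, Or.inl h2⟩
      · rintro ⟨h1, h2 | rfl⟩
        · exact ⟨h1, h2⟩
        · exact ⟨h1, (ih.mp hc).2⟩
    · -- c is not a vowel
      simp only [List.contains_eq_mem, decide_eq_true_eq] at hv
      rw [ih]
      simp only [List.mem_append, List.mem_singleton]
      constructor
      · rintro ⟨h1, h2⟩; exact ⟨h1, Or.inl h2⟩
      · rintro ⟨h1, h2 | rfl⟩
        · exact ⟨h1, h2⟩
        · exact absurd h1 hv

-- first-occurrence rank of a character
def rnk (l : List Char) (u : Char) : Nat := (PySem.List.index? l u).getD 0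

lemma rnk_lt_length {l : List Char} {u : Char} (h : u ∈ l) : rnk l u < l.length := by
  have hs : (PySem.List.index? l u).isSome = true := (PySem.List.index?_isSome_iff l u).mpr h
  rcases Option.isSome_iff_exists.mp hs with ⟨k, hk⟩
  rcases PySem.List.getElem_of_index?_eq_some hk with ⟨hkl, _, _⟩
  unfold rnk
  rw [hk]
  exact hkl

lemma rnk_append_of_mem {l : List Char} {u : Char} (t : List Char) (h : u ∈ l) :
    rnk (l ++ t) u = rnk l u := by
  unfold rnk
  rw [PySem.List.index?_append_of_mem t h]

lemma rnk_append_singleton_self {l : List Char} {c : Char} (h : c ∉ l) :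
    rnk (l ++ [c]) c = l.length := by
  unfold rnk
  rw [PySem.List.index?_append_singleton_self l c h]
  rfl

lemma pairwise_rnk_foldA (l : List Char) :
    (foldA l).Pairwise (fun u w => rnk l u < rnk l w) := by
  induction l using List.reverseRecOn with
  | nil => simp [foldA]
  | append_singleton l c ih =>
    have hsub : ∀ x ∈ foldA l, x ∈ l := fun x hx => ((mem_foldA l x).mp hx).2
    have trans : (foldA l).Pairwise (fun u w => rnk (l ++ [c]) u < rnk (l ++ [c]) w) := by
      refine ih.imp_of_mem ?_
      intro a b ha hb hab
      rw [rnk_append_of_mem [c] (hsub a ha), rnk_append_of_mem [c] (hsub b hb)]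
      exact hab
    rw [foldA_append]
    split_ifs with hv hc
    · -- appended case
      have hcv : c ∈ (['a','e','i','o','u'] : List Char) := by
        simpa using hv
      have hcl : c ∉ l := by
        intro hmem
        simp [List.contains_eq_mem, (mem_foldA l c).mpr ⟨hcv, hmem⟩] at hc
      rw [List.pairwise_append]
      refine ⟨trans, by simp, ?_⟩
      intro a ha b hb
      rcases List.mem_singleton.mp hb with rfl
      rw [rnk_append_of_mem [b] (hsub a ha), rnk_append_singleton_self hcl]
      exact rnk_lt_length (hsub a ha)
    · exact trans
    · exact trans

lemma nodup_foldA (l : List Char) : (foldA l).Nodup := by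
  refine (pairwise_rnk_foldA l).imp ?_
  intro a b hab
  rintro rfl
  omega

-- Chars.find of a single character present in l is its first index.
lemma find_singleton {l : List Char} {v : Char} {k : Nat}
    (h : PySem.List.index? l v = some k) : PySem.Chars.find l [v] = (k : Int) := by
  have hmem : v ∈ l := (PySem.List.index?_isSome_iff l v).mp (by rw [h]; rfl)
  have hin : [v] <:+: l := (List.singleton_infix_iff v l).mpr hmem
  have h0 : 0 ≤ PySem.Chars.find l [v] := (PySem.Chars.find_nonneg_iff l [v]).mpr hin
  obtain ⟨hp, hmin⟩ := PySem.Chars.find_spec h0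
  rcases PySem.List.getElem_of_index?_eq_some h with ⟨hkl, hvk, hminl⟩
  set n := (PySem.Chars.find l [v]).toNat with hn
  have hkpre : [v] <+: l.drop k := by
    refine ⟨l.drop (k + 1), ?_⟩
    rw [List.drop_eq_getElem_cons hkl, hvk]
    rfl
  have hnk : ¬ k < n := fun hlt => hmin k hlt hkpre
  have hkn : ¬ n < k := by
    intro hlt
    have hnl : n < l.length := lt_trans hlt hkl
    rcases hp with ⟨t, ht⟩
    have hget : l[n]? = some v := by
      rw [← List.head?_drop, ← ht]
      rfl
    exact hminl n hlt ((List.getElem_eq_iff hnl).mpr hget)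
  have hnkk : n = k := by omega
  have : PySem.Chars.find l [v] = (n : Int) := (Int.toNat_of_nonneg h0).symm
  rw [this, hnkk]

-- the two intermediate lists agree
lemma lists_eq (l : List Char) :
    PySem.List.sorted
      (((['a','e','i','o','u'] : List Char).filter
        (fun v => PySem.Chars.isIn [v] l)).map (fun v => (PySem.Chars.find l [v], v)))
      (fun p => p.1) false
    = (foldA l).map (fun v => (PySem.Chars.find l [v], v)) := by
  apply PySem.List.sorted_eq_of_perm_of_pairwise_lt
  · apply List.Perm.map
    rw [List.perm_ext_iff_of_nodup (nodup_foldA l)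
      (List.Nodup.filter _ (by decide))]
    intro u
    rw [mem_foldA, List.mem_filter]
    constructor
    · rintro ⟨h1, h2⟩
      exact ⟨h1, by rw [PySem.Chars.isIn_iff_infix]; exact (List.singleton_infix_iff u l).mpr h2⟩
    · rintro ⟨h1, h2⟩
      refine ⟨h1, ?_⟩
      rw [PySem.Chars.isIn_iff_infix] at h2
      exact (List.singleton_infix_iff u l).mp h2
  · rw [List.pairwise_map]
    refine (pairwise_rnk_foldA l).imp_of_mem ?_
    intro a b ha hb hab
    have hal : a ∈ l := ((mem_foldA l a).mp ha).2
    have hbl : b ∈ l := ((mem_foldA l b).mp hb).2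
    rcases Option.isSome_iff_exists.mp ((PySem.List.index?_isSome_iff l a).mpr hal) with ⟨ka, hka⟩
    rcases Option.isSome_iff_exists.mp ((PySem.List.index?_isSome_iff l b).mpr hbl) with ⟨kb, hkb⟩
    simp only [find_singleton hka, find_singleton hkb]
    unfold rnk at hab
    rw [hka, hkb] at hab
    simp only [Option.getD_some] at hab
    exact_mod_cast hab

-- ===== VERDICT (by name: the statement is the Claim_ definition above) =====
theorem get_vowel_spec : Claim_equal_get_vowel := by
  intro input_string _
  show String.mk ("Vowels: ".toList ++ PySem.Chars.join [',', ' ']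
      ((foldA (PySem.Chars.lower input_string.toList)).map (fun i => [i]))) = _
  show _ = String.mk ("Vowels: ".toList ++ PySem.Chars.join [',', ' ']
      ((PySem.List.sorted
        (((['a','e','i','o','u'] : List Char).filter
          (fun v => PySem.Chars.isIn [v] (PySem.Chars.lower input_string.toList))).map
            (fun v => (PySem.Chars.find (PySem.Chars.lower input_string.toList) [v], v)))
        (fun p => p.1) false).map (fun p => [p.2])))
  rw [lists_eq]
  simp [List.map_map, Function.comp_def]
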